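-- pv_equiv track=rewrite | github.com/camerontbelt/complexity-framework | preliminary-research/experiments/cellular-automata/eca-full-scatter.py | complement_rule
-- ===== SOURCE A (Python) =====
-- def complement_rule(r):
--     """Complement symmetry: swap 0s and 1s in the state."""
--     result = 0
--     for i in range(8):
--         ci = (7 - i) ^ 7          # complement neighbourhood: flip all bits
--         j  = 7 - ci               # actually: complement means map i -> 7-i
--         if (r >> i) & 1:
--             result |= (1 << (7 - i))
--     return result ^ 255            # also flip the output bits
-- ===== SOURCE B (Python) =====
-- def complement_rule(r):
--     """Complement symmetry: swap 0s and 1s in the state."""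
--     t = r % 256
--     t = ((t & 0xAA) >> 1) | ((t & 0x55) << 1)
--     t = ((t & 0xCC) >> 2) | ((t & 0x33) << 2)
--     t = ((t & 0xF0) >> 4) | ((t & 0x0F) << 4)
--     return t ^ 255
-- ===== Notes on version B (the rewrite author's own statement) =====
-- stated objective: alternative
-- what changed: Replaces A's 8-iteration loop that copies bit i to bit 7-i with a loopless bit reversal: reduce r mod 256, then three parallel mask-and-swap steps (adjacent bits, bit pairs, nibbles), then XOR 255.
import Mathlib
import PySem

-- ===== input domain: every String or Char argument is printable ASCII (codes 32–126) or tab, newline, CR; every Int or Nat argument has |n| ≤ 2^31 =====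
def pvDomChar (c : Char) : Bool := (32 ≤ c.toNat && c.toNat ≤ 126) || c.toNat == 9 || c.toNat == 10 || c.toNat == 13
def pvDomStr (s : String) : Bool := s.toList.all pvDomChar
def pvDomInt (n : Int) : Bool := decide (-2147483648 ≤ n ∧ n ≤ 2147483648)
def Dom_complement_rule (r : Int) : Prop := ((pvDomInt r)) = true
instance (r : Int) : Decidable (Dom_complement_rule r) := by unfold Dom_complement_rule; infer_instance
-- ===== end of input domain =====

-- B replaces A's 8-iteration bit-copying loop by a loopless mask-and-swap bit reversal
-- (reduce mod 256, three swap steps, XOR 255); objective: simpler/alternative, same O(1) cost.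

-- ===== PORT A =====
-- literal port of A: loop i = 0..7, copy bit i of r to bit 7-i of result, then XOR 255;
-- ci and _j are A's dead local variables, kept for fidelity.
def complement_rule (r : Int) : Int :=
  let result : Int :=
    (PySem.List.pyRange 0 8 1).foldl (fun result i =>
      let ci : Int := PySem.Int.bxor (7 - i) 7
      let _j : Int := 7 - ci
      if PySem.Int.band (r >>> i.toNat) 1 ≠ 0 then
        PySem.Int.bor result ((1 : Int) <<< (7 - i).toNat)
      else result) 0
  PySem.Int.bxor result 255

-- ===== PORT B =====
-- literal port of Source B: t = r % 256, three mask-and-swap steps, XOR 255.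
def complement_rule_alt (r : Int) : Int :=
  let t0 : Int := PySem.Int.mod r 256
  let t1 : Int := PySem.Int.bor ((PySem.Int.band t0 0xAA) >>> (1 : Nat)) ((PySem.Int.band t0 0x55) <<< (1 : Nat))
  let t2 : Int := PySem.Int.bor ((PySem.Int.band t1 0xCC) >>> (2 : Nat)) ((PySem.Int.band t1 0x33) <<< (2 : Nat))
  let t3 : Int := PySem.Int.bor ((PySem.Int.band t2 0xF0) >>> (4 : Nat)) ((PySem.Int.band t2 0x0F) <<< (4 : Nat))
  PySem.Int.bxor t3 255

-- ===== PRECONDITION & SPEC =====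
def Spec_complement_rule (r : Int) (out : Int) : Prop := out = complement_rule_alt r
instance (r : Int) (out : Int) : Decidable (Spec_complement_rule r out) := by unfold Spec_complement_rule; infer_instance

-- ===== CLAIM (what is proved, stated in full; the proofs are below) =====
def Claim_equal_complement_rule : Prop := ∀ (r : Int), Dom_complement_rule r → Spec_complement_rule r (complement_rule r)

-- ===== LEMMAS AND PROOFS =====

-- bit i of r (0 ≤ i < 8) only depends on r % 256
theorem pv_bit_mod (r i : Int) (h0 : 0 ≤ i) (h1 : i < 8) :
    PySem.Int.band (r >>> i.toNat) 1 = PySem.Int.band ((r % 256) >>> i.toNat) 1 := by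
  rw [PySem.Int.band_one, PySem.Int.band_one,
      PySem.Int.mod_eq_emod_of_pos (by norm_num),
      PySem.Int.mod_eq_emod_of_pos (by norm_num),
      Int.shiftRight_eq_div_pow, Int.shiftRight_eq_div_pow]
  have hk : i.toNat < 8 := by omega
  generalize i.toNat = k at hk
  interval_cases k <;> (push_cast; omega)

-- A only reads the low 8 bits of r
theorem pv_A_mod (r : Int) : complement_rule r = complement_rule (r % 256) := by
  unfold complement_rule
  exact congrArg (fun x => PySem.Int.bxor x 255)
    (PySem.List.foldl_congr_mem _ _ _ _ (fun acc i hi => by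
      rw [PySem.List.mem_pyRange_one] at hi
      simp only [pv_bit_mod r i hi.1 hi.2]))

-- B only reads r % 256 (its first step is r % 256, and emod is idempotent)
theorem pv_B_mod (r : Int) : complement_rule_alt r = complement_rule_alt (r % 256) := by
  unfold complement_rule_alt
  rw [PySem.Int.mod_eq_emod_of_pos (by norm_num),
      PySem.Int.mod_eq_emod_of_pos (by norm_num),
      Int.emod_emod_of_dvd r (dvd_refl 256)]

-- the two programs agree on every residue 0..255
theorem pv_small (s : Int) (h0 : 0 ≤ s) (h1 : s < 256) :
    complement_rule s = complement_rule_alt s := by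
  interval_cases s <;> decide

theorem pv_main (r : Int) : complement_rule r = complement_rule_alt r := by
  rw [pv_A_mod, pv_B_mod]
  exact pv_small _ (Int.emod_nonneg r (by norm_num)) (Int.emod_lt_of_pos r (by norm_num))

-- ===== VERDICT (by name: the statement is the Claim_ definition above) =====
theorem complement_rule_spec : Claim_equal_complement_rule := by
  intro r _
  exact pv_main r
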